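-- pv_equiv track=rewrite | github.com/chlendyd7/Algorithm | 리뉴얼/2024/프로그래머스/12/fifth/29/new/귤 고르기.py | solution
-- ===== SOURCE A (Python) =====
-- from collections import Counter
--
-- def solution(k, tangerine):
--     # dict 형태로 내부 key 값을 계산
--     count = Counter(tangerine)
--     # sorted = list return
--     count_lst = sorted(count.items(), key=lambda x: -x[1])
--     answer = 0
--
--     for key, value in count_lst:
--         if k <= 0:
--             break
--         k -= value
--         answer += 1
--     return answer
-- ===== SOURCE B (Python) =====
-- from collections import Counter
--
-- def solution(k, tangerine):
--     # Count kinds, then bucket the frequency values and walk the buckets from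
--     # the largest frequency down instead of sorting the (kind, count) pairs.
--     cnt = Counter(tangerine)
--     freq = Counter(cnt.values())
--     answer = 0
--     top = max(freq) if freq else 0
--     for f in range(top, 0, -1):
--         for _ in range(freq.get(f, 0)):
--             if k <= 0:
--                 return answer
--             k -= f
--             answer += 1
--     return answer
-- ===== Notes on version B (the rewrite author's own statement) =====
-- stated objective: alternative
-- what changed: Replaces the comparison sort of (kind,count) pairs by a bucket count of the frequency values, walked from the largest frequency down.
import Mathlib
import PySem

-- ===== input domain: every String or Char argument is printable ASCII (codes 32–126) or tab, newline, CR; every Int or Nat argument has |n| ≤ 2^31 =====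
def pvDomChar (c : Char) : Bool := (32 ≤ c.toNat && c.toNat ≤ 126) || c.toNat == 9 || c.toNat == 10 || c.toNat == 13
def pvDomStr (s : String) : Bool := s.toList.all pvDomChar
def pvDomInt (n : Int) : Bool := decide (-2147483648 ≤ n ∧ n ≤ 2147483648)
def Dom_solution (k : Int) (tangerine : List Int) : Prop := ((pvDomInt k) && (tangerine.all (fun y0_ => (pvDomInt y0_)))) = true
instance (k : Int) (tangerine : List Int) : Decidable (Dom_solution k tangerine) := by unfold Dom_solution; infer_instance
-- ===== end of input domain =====

-- B replaces A's comparison sort of (kind, count) pairs by bucketing the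
-- frequency values and walking the buckets from the largest frequency down;
-- return values are proved identical on all inputs.

-- ===== PORT A =====
-- the 'for key, value in count_lst: if k <= 0: break; …' loop
def loopA (k ans : Int) : List (Int × Int) → Int
  | [] => ans
  | (_, v) :: rest => if k ≤ 0 then ans else loopA (k - v) (ans + 1) rest

def solution (k : Int) (tangerine : List Int) : Int :=
  let count := PySem.Dict.counter tangerine
  let count_lst := PySem.List.sorted count.items (fun x => -x.2) false
  loopA k 0 count_lst

-- ===== PORT B =====
-- the inner 'for _ in range(freq.get(f, 0)):' loop; Bool = early return taken
def innerB (f : Int) : Nat → Int → Int → Bool × Int × Int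
  | 0, k, ans => (false, k, ans)
  | c + 1, k, ans => if k ≤ 0 then (true, k, ans) else innerB f c (k - f) (ans + 1)

-- the outer 'for f in range(len(tangerine), 0, -1):' loop
def outerB (freq : PySem.Dict Int Int) (k ans : Int) : List Int → Int
  | [] => ans
  | f :: fs =>
    match innerB f ((freq.getD f 0).toNat) k ans with
    | (true, _, ans') => ans'
    | (false, k', ans') => outerB freq k' ans' fs

def solution_alt (k : Int) (tangerine : List Int) : Int :=
  let cnt := PySem.Dict.counter tangerine
  let freq := PySem.Dict.counter cnt.values
  -- 'top = max(freq) if freq else 0' (max over the dict's keys; empty dict is falsy)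
  let top : Int := match PySem.List.max? freq.keys (fun y => y) with
    | some m => m
    | none => 0
  outerB freq k 0 (PySem.List.pyRange top 0 (-1))

-- ===== PRECONDITION & SPEC =====
def Spec_solution (k : Int) (tangerine : List Int) (out : Int) : Prop := out = solution_alt k tangerine
instance (k : Int) (tangerine : List Int) (out : Int) : Decidable (Spec_solution k tangerine out) := by unfold Spec_solution; infer_instance

-- ===== CLAIM (what is proved, stated in full; the proofs are below) =====
def Claim_equal_solution : Prop := ∀ (k : Int) (tangerine : List Int), Dom_solution k tangerine → Spec_solution k tangerine (solution k tangerine)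

-- ===== LEMMAS AND PROOFS =====

-- both loops, reduced to a single loop over the list of frequency VALUES
def loopVals (k ans : Int) : List Int → Int
  | [] => ans
  | v :: rest => if k ≤ 0 then ans else loopVals (k - v) (ans + 1) rest

theorem loopA_eq_loopVals (l : List (Int × Int)) : ∀ k ans, loopA k ans l = loopVals k ans (l.map (·.2)) := by
  induction l with
  | nil => intro k ans; rfl
  | cons p rest ih =>
    intro k ans
    obtain ⟨x, v⟩ := p
    simp only [loopA, List.map, loopVals]
    split_ifs with h
    · rfl
    · exact ih _ _

theorem inner_eq (f : Int) : ∀ (c : Nat) (k ans : Int) (rest : List Int),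
    loopVals k ans (List.replicate c f ++ rest) =
      (match innerB f c k ans with
       | (true, _, ans') => ans'
       | (false, k', ans') => loopVals k' ans' rest) := by
  intro c
  induction c with
  | zero => intro k ans rest; rfl
  | succ c ih =>
    intro k ans rest
    simp only [List.replicate_succ, List.cons_append, loopVals, innerB]
    split_ifs with h
    · rfl
    · exact ih _ _ _

theorem outerB_eq_loopVals (freq : PySem.Dict Int Int) :
    ∀ (fs : List Int) (k ans : Int),
    outerB freq k ans fs =
      loopVals k ans (fs.flatMap (fun f => List.replicate ((freq.getD f 0).toNat) f)) := by
  intro fs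
  induction fs with
  | nil => intro k ans; rfl
  | cons f fs ih =>
    intro k ans
    simp only [outerB, List.flatMap_cons]
    rw [inner_eq]
    cases h : innerB f ((freq.getD f 0).toNat) k ans with
    | mk b p =>
      cases b
      · simp only []
        exact ih _ _
      · rfl

-- the bucket expansion used by B
def expand (c : Int → Nat) (n : Nat) : List Int :=
  (PySem.List.pyRange (n : Int) 0 (-1)).flatMap (fun f => List.replicate (c f) f)

theorem expand_succ (c : Int → Nat) (n : Nat) :
    expand c (n + 1) = List.replicate (c (n + 1)) ((n : Int) + 1) ++ expand c n := by
  unfold expand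
  rw [PySem.List.pyRange_neg_one_cons (by exact_mod_cast Nat.succ_pos n)]
  simp only [List.flatMap_cons]
  norm_num

theorem expand_mem (c : Int → Nat) (n : Nat) : ∀ x ∈ expand c n, 1 ≤ x ∧ x ≤ (n : Int) := by
  induction n with
  | zero =>
    intro x hx
    simp [expand, PySem.List.pyRange_neg_one_eq_nil (le_refl 0)] at hx
  | succ n ih =>
    intro x hx
    rw [expand_succ] at hx
    rcases List.mem_append.mp hx with h | h
    · rcases List.eq_of_mem_replicate h with rfl
      refine ⟨by omega, by push_cast; omega⟩
    · have := ih x h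
      refine ⟨by omega, by push_cast at this ⊢; omega⟩

theorem expand_sorted (c : Int → Nat) (n : Nat) :
    (expand c n).Pairwise (fun x y => y ≤ x) := by
  induction n with
  | zero => simp [expand, PySem.List.pyRange_neg_one_eq_nil (le_refl 0)]
  | succ n ih =>
    rw [expand_succ]
    apply List.pairwise_append.mpr
    refine ⟨List.pairwise_replicate.mpr (Or.inr (le_refl _)), ih, ?_⟩
    intro x hx y hy
    rcases List.eq_of_mem_replicate hx with rfl
    have := (expand_mem c n y hy).2
    omega

theorem expand_count (c : Int → Nat) (n : Nat) (x : Int) :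
    (expand c n).count x = if 1 ≤ x ∧ x ≤ (n : Int) then c x else 0 := by
  induction n with
  | zero =>
    simp only [expand, Nat.cast_zero]
    rw [PySem.List.pyRange_neg_one_eq_nil (le_refl 0), if_neg (by omega)]
    rfl
  | succ n ih =>
    rw [expand_succ, List.count_append, ih, List.count_replicate]
    by_cases hx : x = (n : Int) + 1
    · subst hx
      rw [if_pos (by simp only [beq_iff_eq]), if_neg (by omega),
        if_pos (by push_cast; omega)]
      omega
    · rw [if_neg (by simp only [beq_iff_eq]; omega)]
      by_cases h1 : 1 ≤ x ∧ x ≤ (n : Int)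
      · rw [if_pos h1, if_pos (by push_cast at h1 ⊢; omega)]
        omega
      · rw [if_neg h1, if_neg (by push_cast at h1 ⊢; omega)]

-- elements of Counter(tangerine).values are counts: between 1 and the length
theorem values_counter_bounds (tangerine : List Int) :
    ∀ v ∈ (PySem.Dict.counter tangerine).values, 1 ≤ v ∧ v ≤ (tangerine.length : Int) := by
  intro v hv
  have hitems : (PySem.Dict.counter tangerine).items
      = (PySem.Set.ofList tangerine).map (fun k => (k, (tangerine.count k : Int))) :=
    PySem.Dict.items_counter tangerine
  have hv' : v ∈ ((PySem.Dict.counter tangerine).items).map (·.2) := hv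
  rw [hitems] at hv'
  rcases List.mem_map.mp hv' with ⟨p, hp, rfl⟩
  rcases List.mem_map.mp hp with ⟨key, hkey, rfl⟩
  have hmem : key ∈ tangerine := (PySem.Set.mem_ofList tangerine key).mp hkey
  have h1 : 0 < tangerine.count key := List.count_pos_iff.mpr hmem
  have h2 : tangerine.count key ≤ tangerine.length := List.count_le_length
  dsimp only
  refine ⟨by exact_mod_cast h1, by exact_mod_cast h2⟩

-- B's 'top = max(freq) if freq else 0'
def topOf (tangerine : List Int) : Int :=
  match PySem.List.max? (PySem.Dict.counter ((PySem.Dict.counter tangerine).values)).keys (fun y => y) with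
  | some m => m
  | none => 0

-- every frequency value is at least 1 and at most the maximal frequency
theorem vals_bound (tangerine : List Int) :
    ∀ x ∈ (PySem.Dict.counter tangerine).values, 1 ≤ x ∧ x ≤ (((topOf tangerine).toNat : Nat) : Int) := by
  intro x hx
  have h1 : 1 ≤ x := (values_counter_bounds tangerine x hx).1
  have hkey : x ∈ (PySem.Dict.counter ((PySem.Dict.counter tangerine).values)).keys := by
    rw [PySem.Dict.keys_counter]
    exact (PySem.Set.mem_ofList _ x).mpr hx
  unfold topOf
  cases hm : PySem.List.max? (PySem.Dict.counter ((PySem.Dict.counter tangerine).values)).keys (fun y => y) with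
  | none =>
    rw [PySem.List.max?_eq_none_iff] at hm
    rw [hm] at hkey
    exact absurd hkey (List.not_mem_nil)
  | some m =>
    have := PySem.List.max?_isMax hm x hkey
    simp only at this
    rw [show (match (some m : Option Int) with | some m => m | none => 0) = m from rfl]
    refine ⟨h1, ?_⟩
    omega

-- A's sorted value list and B's bucket expansion are the same list
theorem lists_eq (tangerine : List Int) :
    ((PySem.List.sorted (PySem.Dict.counter tangerine).items (fun x => -x.2) false).map (·.2))
      = expand (fun f => (((PySem.Dict.counter ((PySem.Dict.counter tangerine).values)).getD f 0).toNat))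
          (topOf tangerine).toNat := by
  set vals := (PySem.Dict.counter tangerine).values with hvals
  set c : Int → Nat := fun f => (((PySem.Dict.counter vals).getD f 0).toNat) with hc
  set L := ((PySem.List.sorted (PySem.Dict.counter tangerine).items (fun x => -x.2) false).map (·.2)) with hL
  set R := expand c (topOf tangerine).toNat with hR
  -- c f = vals.count f
  have hcf : ∀ f, c f = vals.count f := by
    intro f
    simp only [hc, PySem.Dict.getD_counter]
    exact Int.toNat_natCast _
  -- both lists are permutations of vals
  have hpermL : L.Perm vals := by
    rw [hL, hvals]
    exact List.Perm.map (fun p => p.2)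
      (PySem.List.sorted_perm (PySem.Dict.counter tangerine).items (fun x => -x.2) false)
  have hpermR : R.Perm vals := by
    apply (List.perm_iff_count).mpr
    intro x
    rw [hR, expand_count]
    split_ifs with h
    · exact hcf x
    · symm
      rw [List.count_eq_zero]
      intro hx
      exact h (vals_bound tangerine x hx)
  -- both are sorted descending
  have hsortL : L.Pairwise (fun x y => y ≤ x) := by
    have := PySem.List.sorted_pairwise (PySem.Dict.counter tangerine).items (fun x => -x.2)
    rw [hL]
    exact List.Pairwise.map _ (fun a b h => by simpa using h) this
  have hsortR : R.Pairwise (fun x y => y ≤ x) := expand_sorted c _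
  exact List.Perm.eq_of_pairwise (fun a b _ _ h1 h2 => le_antisymm h2 h1)
    hsortL hsortR (hpermL.trans hpermR.symm)

theorem solution_eq (k : Int) (tangerine : List Int) :
    solution k tangerine = loopVals k 0
      ((PySem.List.sorted (PySem.Dict.counter tangerine).items (fun x => -x.2) false).map (·.2)) :=
  loopA_eq_loopVals _ k 0

theorem solution_alt_eq (k : Int) (tangerine : List Int) :
    solution_alt k tangerine = loopVals k 0
      (expand (fun f => (((PySem.Dict.counter ((PySem.Dict.counter tangerine).values)).getD f 0).toNat))
        (topOf tangerine).toNat) := by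
  have h0 : PySem.List.pyRange (topOf tangerine) 0 (-1)
      = PySem.List.pyRange (((topOf tangerine).toNat : Nat) : Int) 0 (-1) := by
    by_cases h : 0 ≤ topOf tangerine
    · rw [Int.toNat_of_nonneg h]
    · rw [PySem.List.pyRange_neg_one_eq_nil (by omega),
        PySem.List.pyRange_neg_one_eq_nil (by omega)]
  have h1 : solution_alt k tangerine
      = outerB (PySem.Dict.counter ((PySem.Dict.counter tangerine).values)) k 0
          (PySem.List.pyRange (topOf tangerine) 0 (-1)) := rfl
  rw [h1, h0, outerB_eq_loopVals]
  rfl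

-- ===== VERDICT (by name: the statement is the Claim_ definition above) =====
theorem solution_spec : Claim_equal_solution := by
  intro k tangerine _
  show solution k tangerine = solution_alt k tangerine
  rw [solution_eq, solution_alt_eq, lists_eq]
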